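-- pv_equiv track=rewrite | github.com/warrenzhu25/spark-insight-mcp | src/spark_history_mcp/tools/cleanup.py | _match_gcs_files
-- ===== SOURCE A (Python) =====
-- from typing import Any, Dict, List, Optional, Tuple
--
-- def _match_gcs_files(
--     app_ids: List[str], gcs_files: List[str]
-- ) -> Tuple[List[str], List[str]]:
--     """Match GCS file paths to application IDs.
--
--     For each app ID, finds GCS files containing that ID as a substring.
--     Handles attempt suffixes (_1, _2) and extensions (.zstd, .lz4, etc.).
--
--     Returns:
--         Tuple of (matched_file_paths, app_ids_not_found_in_gcs).
--     """
--     matched_files: List[str] = []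
--     not_found: List[str] = []
--
--     for app_id in app_ids:
--         found = [f for f in gcs_files if app_id in f]
--         if found:
--             matched_files.extend(found)
--         else:
--             not_found.append(app_id)
--
--     # Deduplicate while preserving order
--     seen: set[str] = set()
--     unique_files: List[str] = []
--     for f in matched_files:
--         if f not in seen:
--             seen.add(f)
--             unique_files.append(f)
--
--     return unique_files, not_found
-- ===== SOURCE B (Python) =====
-- from typing import List, Optional, Tuple
--
--
-- def _first_match(app_ids: List[str], f: str) -> Optional[int]:
--     """Index of the first app_id contained in f, or None."""
--     for i, a in enumerate(app_ids):
--         if a in f: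
--             return i
--     return None
--
--
-- def _match_gcs_files(
--     app_ids: List[str], gcs_files: List[str]
-- ) -> Tuple[List[str], List[str]]:
--     # File-major grouping: dedup the files once, key each file by the first
--     # app_id it contains, and emit the groups in app_id order.  No matched
--     # list is built and no dedup pass runs afterwards.
--     files = list(dict.fromkeys(gcs_files))
--     firsts = [_first_match(app_ids, f) for f in files]
--     unique_files = [f for i, _ in enumerate(app_ids)
--                     for f, k in zip(files, firsts) if k == i]
--     not_found = [a for a in app_ids if not any(a in f for f in gcs_files)]
--     return unique_files, not_found
-- ===== Notes on version B (the rewrite author's own statement) =====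
-- stated objective: alternative
-- what changed: B is file-major: it dedups the files once, keys each deduplicated file by the index of the first app_id it contains (stopping at the first hit), and emits the groups in app_id order, instead of A's app-major matched list (with duplicates) followed by a seen-set dedup pass.
import Mathlib
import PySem

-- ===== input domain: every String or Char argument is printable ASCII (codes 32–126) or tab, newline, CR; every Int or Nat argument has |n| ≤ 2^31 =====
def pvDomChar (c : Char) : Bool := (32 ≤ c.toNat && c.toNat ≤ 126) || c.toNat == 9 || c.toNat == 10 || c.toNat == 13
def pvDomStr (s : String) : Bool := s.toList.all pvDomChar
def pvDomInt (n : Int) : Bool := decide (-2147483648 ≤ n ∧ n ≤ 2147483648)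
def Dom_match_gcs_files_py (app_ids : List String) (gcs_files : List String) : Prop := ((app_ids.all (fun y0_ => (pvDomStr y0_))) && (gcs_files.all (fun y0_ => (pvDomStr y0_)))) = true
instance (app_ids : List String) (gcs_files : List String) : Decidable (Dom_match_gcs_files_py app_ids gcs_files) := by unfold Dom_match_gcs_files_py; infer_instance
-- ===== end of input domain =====

-- B groups the deduplicated files by the first app_id each one contains (file-major),
-- instead of A's app-major matched list followed by a seen-set dedup pass; same cost class.

-- ===== PORT A =====
def match_gcs_files_py (app_ids : List String) (gcs_files : List String) : List String × List String :=
  -- for app_id in app_ids: found = [f for f in gcs_files if app_id in f]; extend / append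
  let mn := app_ids.foldl (fun (st : List String × List String) app_id =>
      let found := gcs_files.filter (fun f => PySem.Str.isIn app_id f)
      if found = [] then (st.1, st.2 ++ [app_id]) else (st.1 ++ found, st.2))
    ([], [])
  -- dedup while preserving order, with a seen set
  let su := mn.1.foldl (fun (st : PySem.Set String × List String) f =>
      if PySem.Set.contains st.1 f then st else (PySem.Set.add st.1 f, st.2 ++ [f]))
    (PySem.Set.empty, [])
  (su.2, mn.2)

-- ===== PORT B =====
-- _first_match: for i, a in enumerate(app_ids): if a in f: return i;  return None
def firstMatchAux (f : String) : Int → List String → Option Int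
  | _, [] => none
  | i, a :: rest => if PySem.Str.isIn a f then some i else firstMatchAux f (i + 1) rest

def firstMatch (app_ids : List String) (f : String) : Option Int := firstMatchAux f 0 app_ids

def match_gcs_files_py_alt (app_ids : List String) (gcs_files : List String) : List String × List String :=
  let files := PySem.List.dedup gcs_files                     -- list(dict.fromkeys(gcs_files))
  let firsts := files.map (fun f => firstMatch app_ids f)
  let unique := (PySem.List.enumerate app_ids 0).flatMap (fun ia =>
      (files.zip firsts).filterMap (fun fk => if fk.2 = some ia.1 then some fk.1 else none))
  let notFound := app_ids.filter (fun a => !(gcs_files.any (fun f => PySem.Str.isIn a f)))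
  (unique, notFound)

-- ===== PRECONDITION & SPEC =====
def Spec_match_gcs_files_py (app_ids : List String) (gcs_files : List String) (out : List String × List String) : Prop := out = match_gcs_files_py_alt app_ids gcs_files
instance (app_ids : List String) (gcs_files : List String) (out : List String × List String) : Decidable (Spec_match_gcs_files_py app_ids gcs_files out) := by unfold Spec_match_gcs_files_py; infer_instance

-- ===== CLAIM (what is proved, stated in full; the proofs are below) =====
def Claim_equal_match_gcs_files_py : Prop := ∀ (app_ids : List String) (gcs_files : List String), Dom_match_gcs_files_py app_ids gcs_files → Spec_match_gcs_files_py app_ids gcs_files (match_gcs_files_py app_ids gcs_files)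

-- ===== LEMMAS AND PROOFS =====

-- order-preserving dedup against a seen list (the mathematical core of A's second loop)
def du (seen : List String) : List String → List String
  | [] => []
  | x :: xs => if x ∈ seen then du seen xs else x :: du (seen ++ [x]) xs

-- g: file-major grouping, app-major recursion (the common middle form)
def gGroup (fs : List String) : List String → List String
  | [] => []
  | a :: r => fs.filter (fun f => PySem.Str.isIn a f)
      ++ gGroup (fs.filter (fun f => !PySem.Str.isIn a f)) r

theorem du_congr (l : List String) : ∀ (s s' : List String), (∀ y ∈ l, (y ∈ s ↔ y ∈ s')) → du s l = du s' l := by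
  induction l with
  | nil => intro s s' _; rfl
  | cons x xs ih =>
    intro s s' h
    simp only [du]
    have hx := h x (by simp)
    by_cases hxs : x ∈ s
    · rw [if_pos hxs, if_pos (hx.mp hxs)]
      exact ih s s' (fun y hy => h y (by simp [hy]))
    · rw [if_neg hxs, if_neg (fun hc => hxs (hx.mpr hc))]
      refine congrArg (x :: ·) (ih _ _ (fun y hy => ?_))
      simp only [List.mem_append, List.mem_singleton]
      exact or_congr (h y (by simp [hy])) Iff.rfl

theorem du_append (l1 l2 : List String) : ∀ s, du s (l1 ++ l2) = du s l1 ++ du (s ++ l1) l2 := by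
  induction l1 with
  | nil => intro s; simp [du]
  | cons x xs ih =>
    intro s
    simp only [List.cons_append, du]
    by_cases hxs : x ∈ s
    · rw [if_pos hxs, if_pos hxs, ih]
      refine congrArg _ (du_congr _ _ _ (fun y _ => ?_))
      simp only [List.mem_append, List.mem_cons]
      constructor
      · rintro (h | h)
        · exact Or.inl h
        · exact Or.inr (Or.inr h)
      · rintro (h | h | h)
        · exact Or.inl h
        · subst h; exact Or.inl hxs
        · exact Or.inr h
    · rw [if_neg hxs, if_neg hxs, ih]
      have hrw : (s ++ [x]) ++ xs = s ++ x :: xs := by simp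
      rw [hrw, List.cons_append]

theorem du_subset (l : List String) : ∀ s y, y ∈ du s l → y ∈ l := by
  induction l with
  | nil => intro s y h; simp [du] at h
  | cons x xs ih =>
    intro s y h
    simp only [du] at h
    by_cases hxs : x ∈ s
    · rw [if_pos hxs] at h; exact List.mem_cons_of_mem _ (ih _ _ h)
    · rw [if_neg hxs] at h
      rcases List.mem_cons.mp h with h | h
      · simp [h]
      · exact List.mem_cons_of_mem _ (ih _ _ h)

theorem du_filter (q : String → Bool) (l : List String) : ∀ s, du s (l.filter q) = (du s l).filter q := by
  induction l with
  | nil => intro s; simp [du]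
  | cons x xs ih =>
    intro s
    by_cases hq : q x = true
    · rw [List.filter_cons_of_pos hq]
      simp only [du]
      by_cases hxs : x ∈ s
      · rw [if_pos hxs, if_pos hxs, ih]
      · rw [if_neg hxs, if_neg hxs, List.filter_cons_of_pos hq, ih]
    · have hq' : q x = false := by simpa using hq
      rw [List.filter_cons_of_neg hq]
      simp only [du]
      by_cases hxs : x ∈ s
      · rw [if_pos hxs, ih]
      · rw [if_neg hxs, List.filter_cons_of_neg hq, ← ih]
        refine du_congr _ _ _ (fun y hy => ?_)
        have hyx : y ≠ x := by
          rintro rfl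
          have := List.of_mem_filter hy
          simp [hq'] at this
        simp [hyx]

theorem du_split (l : List String) : ∀ s t, du (s ++ t) l = (du t l).filter (fun y => decide (y ∉ s)) := by
  induction l with
  | nil => intro s t; simp [du]
  | cons x xs ih =>
    intro s t
    simp only [du]
    by_cases hxt : x ∈ t
    · rw [if_pos (by simp [hxt]), if_pos hxt, ih]
    · rw [if_neg hxt]
      by_cases hxs : x ∈ s
      · rw [if_pos (by simp [hxs])]
        rw [List.filter_cons_of_neg (by simp [hxs])]
        rw [← ih s (t ++ [x])]
        refine du_congr _ _ _ (fun y _ => ?_)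
        simp only [List.mem_append, List.mem_singleton]
        constructor
        · rintro (h | h)
          · exact Or.inl h
          · exact Or.inr (Or.inl h)
        · rintro (h | h | h)
          · exact Or.inl h
          · exact Or.inr h
          · subst h; exact Or.inl hxs
      · rw [if_neg (by simp [hxs, hxt])]
        rw [List.filter_cons_of_pos (by simp [hxs])]
        refine congrArg (x :: ·) ?_
        rw [← ih s (t ++ [x])]
        have hrw : (s ++ t) ++ [x] = s ++ (t ++ [x]) := by simp
        rw [hrw]

-- A's matched/not_found loop, characterised
theorem aLoop_eq (gcs_files : List String) (apps : List String) : ∀ acc1 acc2,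
    apps.foldl (fun (st : List String × List String) app_id =>
      let found := gcs_files.filter (fun f => PySem.Str.isIn app_id f)
      if found = [] then (st.1, st.2 ++ [app_id]) else (st.1 ++ found, st.2)) (acc1, acc2)
    = (acc1 ++ apps.flatMap (fun a => gcs_files.filter (fun f => PySem.Str.isIn a f)),
       acc2 ++ apps.filter (fun a => decide (gcs_files.filter (fun f => PySem.Str.isIn a f) = []))) := by
  induction apps with
  | nil => intro acc1 acc2; simp
  | cons a r ih =>
    intro acc1 acc2
    simp only [List.foldl_cons]
    by_cases h : gcs_files.filter (fun f => PySem.Str.isIn a f) = []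
    · rw [if_pos h, ih, List.flatMap_cons, h, List.filter_cons_of_pos (by exact decide_eq_true h)]
      simp [List.append_assoc]
    · rw [if_neg h, ih, List.flatMap_cons, List.filter_cons_of_neg (by simpa using h)]
      simp [List.append_assoc]

-- A's dedup loop, characterised by du
theorem aDedup_eq (l : List String) : ∀ (s : PySem.Set String) acc,
    (l.foldl (fun (st : PySem.Set String × List String) f =>
      if PySem.Set.contains st.1 f then st else (PySem.Set.add st.1 f, st.2 ++ [f])) (s, acc)).2
    = acc ++ du s l := by
  induction l with
  | nil => intro s acc; simp [du]
  | cons x xs ih =>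
    intro s acc
    simp only [List.foldl_cons, du]
    by_cases hxs : x ∈ s
    · rw [if_pos ((PySem.Set.contains_iff _ _).mpr hxs), if_pos hxs, ih]
    · rw [if_neg (fun hc => hxs ((PySem.Set.contains_iff _ _).mp hc)), if_neg hxs]
      have hadd : PySem.Set.add s x = s ++ [x] := by
        simp only [PySem.Set.add, if_neg (fun hc => hxs ((PySem.Set.contains_iff _ _).mp hc))]
      rw [hadd, ih]
      simp

-- dict.fromkeys dedup is du []
theorem foldl_add_eq_du (l : List String) : ∀ (s : PySem.Set String),
    l.foldl PySem.Set.add s = s ++ du s l := by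
  induction l with
  | nil => intro s; simp [du]
  | cons x xs ih =>
    intro s
    simp only [List.foldl_cons, du]
    by_cases hxs : x ∈ s
    · rw [if_pos hxs]
      have : PySem.Set.add s x = s := by
        simp only [PySem.Set.add, if_pos ((PySem.Set.contains_iff _ _).mpr hxs)]
      rw [this, ih]
    · rw [if_neg hxs]
      have : PySem.Set.add s x = s ++ [x] := by
        simp only [PySem.Set.add, if_neg (fun hc => hxs ((PySem.Set.contains_iff _ _).mp hc))]
      rw [this, ih]
      simp

theorem dedup_eq_du (l : List String) : PySem.List.dedup l = du [] l := by
  have := foldl_add_eq_du l []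
  simpa [PySem.List.dedup_eq_ofList, PySem.Set.ofList_eq_foldl] using this

-- main bridge: A's dedup of the app-major matched list = the file-major grouping
theorem du_flatMap_eq_gGroup (gcs_files : List String) (apps : List String) : ∀ (s : List String),
    du s (apps.flatMap (fun a => gcs_files.filter (fun f => PySem.Str.isIn a f)))
    = gGroup ((du [] gcs_files).filter (fun f => decide (f ∉ s))) apps := by
  induction apps with
  | nil => intro s; simp [du, gGroup]
  | cons a r ih =>
    intro s
    rw [List.flatMap_cons, du_append, ih, gGroup]
    have h1 : du s (gcs_files.filter (fun f => PySem.Str.isIn a f))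
        = ((du [] gcs_files).filter (fun f => decide (f ∉ s))).filter (fun f => PySem.Str.isIn a f) := by
      rw [du_filter]
      have : du s gcs_files = (du [] gcs_files).filter (fun y => decide (y ∉ s)) := by
        have := du_split gcs_files s []
        simpa using this
      rw [this, List.filter_comm]
    rw [h1]
    congr 1
    have h2 : (du [] gcs_files).filter (fun f => decide (f ∉ s ++ gcs_files.filter (fun f => PySem.Str.isIn a f)))
        = ((du [] gcs_files).filter (fun f => decide (f ∉ s))).filter (fun f => !PySem.Str.isIn a f) := by
      rw [List.filter_filter]
      refine List.filter_congr (fun f hf => ?_)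
      have hfg : f ∈ gcs_files := du_subset _ _ _ hf
      by_cases hp : PySem.Chars.isIn a.toList f.toList = true
      · simp [List.mem_append, List.mem_filter, hp, hfg]
      · have hp' : PySem.Chars.isIn a.toList f.toList = false := by simpa using hp
        by_cases hs : f ∈ s
        · simp [List.mem_append, List.mem_filter, hp', hs]
        · simp [List.mem_append, List.mem_filter, hp', hs]
    rw [← h2]

-- firstMatchAux never returns an index below its counter
theorem firstMatchAux_ge (f : String) (l : List String) : ∀ (i j : Int), firstMatchAux f i l = some j → i ≤ j := by
  induction l with
  | nil => intro i j h; simp [firstMatchAux] at h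
  | cons a r ih =>
    intro i j h
    simp only [firstMatchAux] at h
    by_cases hp : PySem.Str.isIn a f
    · rw [if_pos hp] at h
      injection h with h
      omega
    · rw [if_neg hp] at h
      have := ih (i + 1) j h
      omega

-- the zip/filterMap comprehension is a filter
theorem zip_filterMap_eq_filter (h : String → Option Int) (i : Int) (fs : List String) :
    (fs.zip (fs.map h)).filterMap (fun fk => if fk.2 = some i then some fk.1 else none)
    = fs.filter (fun f => decide (h f = some i)) := by
  induction fs with
  | nil => rfl
  | cons x xs ih =>
    simp only [List.map_cons, List.zip_cons_cons, List.filterMap_cons, List.filter_cons]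
    by_cases hx : h x = some i
    · simp [hx, ih]
    · simp [hx, ih]

-- the enumerate/first-match flatten is gGroup
theorem enum_flatten_eq_gGroup (apps : List String) : ∀ (s : Int) (fs : List String),
    (PySem.List.enumerate apps s).flatMap (fun ia =>
      fs.filter (fun f => decide (firstMatchAux f s apps = some ia.1)))
    = gGroup fs apps := by
  induction apps with
  | nil => intro s fs; simp [PySem.List.enumerate_nil, gGroup]
  | cons a r ih =>
    intro s fs
    rw [PySem.List.enumerate_cons, List.flatMap_cons, gGroup]
    congr 1
    · refine List.filter_congr (fun f _ => ?_)
      by_cases hp : PySem.Str.isIn a f = true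
      · have hv : firstMatchAux f s (a :: r) = some s := by
          simp only [firstMatchAux, if_pos hp]
        have hp' : PySem.Chars.isIn a.toList f.toList = true := by simpa using hp
        simp [hv, hp']
      · have hv : firstMatchAux f s (a :: r) = firstMatchAux f (s + 1) r := by
          simp only [firstMatchAux, if_neg hp]
        have hp' : PySem.Chars.isIn a.toList f.toList = false := by simpa using hp
        rw [show PySem.Str.isIn a f = false by simpa using hp]
        simp only [hv]
        apply decide_eq_false
        intro hc
        have := firstMatchAux_ge f r (s + 1) s hc
        omega
    · rw [← ih (s + 1) (fs.filter (fun f => !PySem.Str.isIn a f))]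
      refine List.flatMap_congr (fun ia hia => ?_)
      have hge : s + 1 ≤ ia.1 := by
        rcases (PySem.List.mem_enumerate_iff _ _ _).mp hia with ⟨k, hk, hp⟩
        subst hp
        omega
      rw [List.filter_filter]
      refine List.filter_congr (fun f _ => ?_)
      by_cases hp : PySem.Str.isIn a f = true
      · have hv : firstMatchAux f s (a :: r) = some s := by
          simp only [firstMatchAux, if_pos hp]
        have hne : ¬ ((some s : Option Int) = some ia.1) := by
          intro hc; injection hc with hc; omega
        have hp' : PySem.Chars.isIn a.toList f.toList = true := by simpa using hp
        simp [hv, hp', hne]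
      · have hv : firstMatchAux f s (a :: r) = firstMatchAux f (s + 1) r := by
          simp only [firstMatchAux, if_neg hp]
        have hp' : PySem.Chars.isIn a.toList f.toList = false := by simpa using hp
        simp [hv, hp']

-- ===== VERDICT (by name: the statement is the Claim_ definition above) =====
theorem match_gcs_files_py_spec : Claim_equal_match_gcs_files_py := by
  intro app_ids gcs_files _
  unfold Spec_match_gcs_files_py match_gcs_files_py match_gcs_files_py_alt
  simp only []
  rw [aLoop_eq]
  simp only [List.nil_append]
  rw [aDedup_eq]
  simp only [List.nil_append]
  refine Prod.ext ?_ ?_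
  · show du PySem.Set.empty (app_ids.flatMap _) = _
    have hempty : (PySem.Set.empty : PySem.Set String) = ([] : List String) := rfl
    rw [hempty, du_flatMap_eq_gGroup]
    have : (du [] gcs_files).filter (fun f => decide (f ∉ ([] : List String))) = du [] gcs_files := by
      simp
    rw [this, dedup_eq_du]
    have hz : ∀ ia : Int × String,
        ((du [] gcs_files).zip ((du [] gcs_files).map (fun f => firstMatch app_ids f))).filterMap
          (fun fk => if fk.2 = some ia.1 then some fk.1 else none)
        = (du [] gcs_files).filter (fun f => decide (firstMatchAux f 0 app_ids = some ia.1)) := by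
      intro ia
      rw [zip_filterMap_eq_filter]
      rfl
    calc gGroup (du [] gcs_files) app_ids
        = (PySem.List.enumerate app_ids 0).flatMap (fun ia =>
            (du [] gcs_files).filter (fun f => decide (firstMatchAux f 0 app_ids = some ia.1))) :=
          (enum_flatten_eq_gGroup app_ids 0 (du [] gcs_files)).symm
      _ = _ := by
          refine (List.flatMap_congr (fun ia _ => ?_)).symm
          exact hz ia
  · show app_ids.filter _ = app_ids.filter _
    refine List.filter_congr (fun a _ => ?_)
    cases hA : gcs_files.any (fun f => PySem.Chars.isIn a.toList f.toList) with
    | false =>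
        have hall : ∀ a1 ∈ gcs_files, PySem.Chars.isIn a.toList a1.toList = false := by
          intro f hf
          have := List.any_eq_false.mp hA f hf
          simpa using this
        simpa [hA] using hall
    | true =>
        rcases List.any_eq_true.mp hA with ⟨f, hf, hp⟩
        have hnot : ¬ (∀ a1 ∈ gcs_files, PySem.Chars.isIn a.toList a1.toList = false) := by
          intro hall
          rw [hall f hf] at hp
          exact Bool.false_ne_true hp
        simp [hA, hnot]
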